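-- pv_equiv track=rewrite | github.com/scout719/adventOfCode | 2022/adventOfCode_10.py | day10_1
-- ===== SOURCE A (Python) =====
-- def day10_parse(data):
--     inst = []
--     for line in data:
--         op = line.split()
--         inst.append(op)
--     return inst
--
-- def day10_cycle(x, val, p1, p2):
--     if len(p1) > 0:
--         x += p1.pop()
--     p1 = p2
--     p2 = [val]
--
--     return x, p1, p2
--
-- def day10_1(data):
--     insts = day10_parse(data)
--     x = 1
--     cycle = 0
--     p_1 = []
--     p_2 = []
--     total = 0
--     for op in insts:
--         if (cycle - 20) % 40 == 0:
--             total += cycle * x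
--         if len(op) > 1:
--             _, val = op
--             val = int(val)
--             x, p_1, p_2 = day10_cycle(x, val, p_1, p_2)
--             cycle += 1
--             if (cycle - 20) % 40 == 0:
--                 total += cycle * x
--         x, p_1, p_2 = day10_cycle(x, 0, p_1, p_2)
--         cycle += 1
--     # 7040
--     return total
-- ===== SOURCE B (Python) =====
-- def day10_1(data):
--     # Phase 1: one value inserted into the pipeline per CPU cycle (addx inserts
--     # its operand on its first cycle, 0 on its second; a 1-token/empty line is 0).
--     ins = []
--     for line in data:
--         op = line.split()
--         if len(op) > 1:
--             _, val = op
--             ins.append(int(val))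
--             ins.append(0)
--         else:
--             ins.append(0)
--     # Phase 2: prefix sums; x during check cycle c is 1 + sum(ins[:c-2])
--     # (A's pipeline applies an inserted value three cycles later).
--     pre = [0]
--     for v in ins:
--         pre.append(pre[-1] + v)
--     return sum(c * (1 + pre[c - 2]) for c in range(len(ins)) if (c - 20) % 40 == 0)
-- ===== Notes on version B (the rewrite author's own statement) =====
-- stated objective: simpler
-- what changed: Replaces the mutable two-slot pipeline (day10_cycle shifting p_1/p_2 with pops) and the duplicated mid-instruction check by a flat per-cycle insertion list, a prefix-sum array, and one closed-form sum c*(1+pre[c-2]) over the checked cycles.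
import Mathlib
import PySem

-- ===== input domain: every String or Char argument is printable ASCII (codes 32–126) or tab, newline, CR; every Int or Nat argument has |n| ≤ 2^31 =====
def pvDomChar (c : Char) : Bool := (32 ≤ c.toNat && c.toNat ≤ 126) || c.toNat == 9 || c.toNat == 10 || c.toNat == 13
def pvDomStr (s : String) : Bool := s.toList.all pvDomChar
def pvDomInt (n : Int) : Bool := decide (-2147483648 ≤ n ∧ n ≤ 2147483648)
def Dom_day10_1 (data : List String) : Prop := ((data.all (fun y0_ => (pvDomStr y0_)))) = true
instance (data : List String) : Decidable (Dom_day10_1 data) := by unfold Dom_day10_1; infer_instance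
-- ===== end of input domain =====

-- B replaces A's two-slot mutable pipeline by a flat per-cycle insertion list and a
-- closed-form sum over the checked cycles (objective: simpler).
-- Pre_ excludes inputs on which A raises (a line with >= 2 whitespace-separated tokens
-- that is not exactly 2 tokens with an int()-parseable second token); B raises there too.


-- ===== PORT A =====
def day10_parse (data : List String) : List (List String) :=
  data.foldl (fun inst line => inst ++ [PySem.Str.split₀ line]) []

-- p1.pop() pops the last element; the mutated p1 is immediately overwritten by p2
def day10_cycle (x val : Int) (p1 p2 : List Int) : Int × List Int × List Int :=
  let x :=
    if p1.length > 0 then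
      match PySem.List.pop? p1 (-1) with
      | some (v, _) => x + v
      | none => x          -- unreachable: p1 is nonempty
    else x
  (x, p2, [val])

-- loop body of A's for-loop; state = (x, cycle, p1, p2, total)
def day10_step : (Int × Int × List Int × List Int × Int) → List String →
    Int × Int × List Int × List Int × Int
  | (x, cycle, p1, p2, total), op =>
  let total := if PySem.Int.mod (cycle - 20) 40 == 0 then total + cycle * x else total
  let (x, cycle, p1, p2, total) :=
    if op.length > 1 then
      match op with
      | [_, v] =>
        let val := (PySem.Int.ofStr? v).getD 0   -- Python raises ValueError on none: outside Pre_
        let (x, p1, p2) := day10_cycle x val p1 p2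
        let cycle := cycle + 1
        let total := if PySem.Int.mod (cycle - 20) 40 == 0 then total + cycle * x else total
        (x, cycle, p1, p2, total)
      | _ => (x, cycle, p1, p2, total)           -- Python raises ValueError (tuple unpack): outside Pre_
    else (x, cycle, p1, p2, total)
  let (x, p1, p2) := day10_cycle x 0 p1 p2
  (x, cycle + 1, p1, p2, total)

def day10_1 (data : List String) : Int :=
  let insts := day10_parse data
  (insts.foldl day10_step (1, 0, [], [], 0)).2.2.2.2

-- ===== PORT B =====
-- loop body of B's first loop: per-cycle inserted pipeline values
def day10_ins_step (ins : List Int) (line : String) : List Int :=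
  let op := PySem.Str.split₀ line
  if op.length > 1 then
    match op with
    | [_, v] => (ins ++ [(PySem.Int.ofStr? v).getD 0]) ++ [0]  -- Python raises on none: outside Pre_
    | _ => ins                                                 -- Python raises (tuple unpack): outside Pre_
  else ins ++ [0]

-- loop body of B's prefix-sum loop: pre.append(pre[-1] + v)
def day10_pre_step (pre : List Int) (v : Int) : List Int :=
  pre ++ [(PySem.List.pyGet? pre (-1)).getD 0 + v]   -- pre is never empty: pre[-1] never raises

def day10_1_alt (data : List String) : Int :=
  let ins := data.foldl day10_ins_step []
  let pre := ins.foldl day10_pre_step [0]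
  (((PySem.List.pyRange 0 (ins.length : Int) 1).filter
      (fun c => PySem.Int.mod (c - 20) 40 == 0)).map
    (fun c => c * (1 + (PySem.List.pyGet? pre (c - 2)).getD 0))).sum

-- ===== PRECONDITION & SPEC =====
-- Pre_ excludes exactly the lines on which A raises ValueError (>1 token but not
-- exactly "word int"): both programs raise there, nothing is excluded that A returns on.
def Pre_day10_1 (data : List String) : Prop :=
  ∀ line ∈ data,
    (PySem.Str.split₀ line).length ≤ 1 ∨
    ((PySem.Str.split₀ line).length = 2 ∧
      (PySem.Int.ofStr? ((PySem.Str.split₀ line).getD 1 "")).isSome = true)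
instance (data : List String) : Decidable (Pre_day10_1 data) := by
  unfold Pre_day10_1; infer_instance

def pvWitness_day10_1 : List String := ["noop", "addx 3", "", "addx -5"]

def Spec_day10_1 (data : List String) (out : Int) : Prop := out = day10_1_alt data
instance (data : List String) (out : Int) : Decidable (Spec_day10_1 data out) := by
  unfold Spec_day10_1; infer_instance

-- ===== CLAIM (what is proved, stated in full; the proofs are below) =====
def Claim_equal_day10_1 : Prop :=
  ∀ (data : List String), Dom_day10_1 data → Pre_day10_1 data →
    Spec_day10_1 data (day10_1 data)

-- ===== LEMMAS AND PROOFS =====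

-- the pipeline values one instruction inserts (one per cycle it takes)
def eop (op : List String) : List Int :=
  if op.length > 1 then
    match op with
    | [_, v] => [(PySem.Int.ofStr? v).getD 0, 0]
    | _ => []
  else [0]

def eflat (ops : List (List String)) : List Int := ops.flatMap eop

-- x during check cycle c
def xa (L : List Int) (c : Nat) : Int := 1 + (L.take (c - 2)).sum

def p1f (L : List Int) (n : Nat) : List Int :=
  if 2 ≤ n then [L.getD (n - 2) 0] else []
def p2f (L : List Int) (n : Nat) : List Int :=
  if 1 ≤ n then [L.getD (n - 1) 0] else []

-- total contributed by checks at cycles n, n+1, …, L.length - 1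
def S (L : List Int) (n : Nat) : Int :=
  ((List.range' n (L.length - n)).map
    (fun (c : Nat) => if PySem.Int.mod ((c : Int) - 20) 40 == 0 then (c : Int) * xa L c else 0)).sum

def GoodOp (op : List String) : Prop :=
  op.length ≤ 1 ∨ (op.length = 2 ∧ (PySem.Int.ofStr? (op.getD 1 "")).isSome = true)

lemma sum_take_succ (L : List Int) (k : Nat) (h : k < L.length) :
    (L.take (k + 1)).sum = (L.take k).sum + L.getD k 0 := by
  rw [List.sum_take_succ L k h, List.getD_eq_getElem L 0 h]

lemma day10_parse_eq_aux (data : List String) (acc : List (List String)) :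
    data.foldl (fun inst line => inst ++ [PySem.Str.split₀ line]) acc
      = acc ++ data.map PySem.Str.split₀ := by
  induction data generalizing acc with
  | nil => simp
  | cons a l ih => simp [ih]

lemma day10_parse_eq (data : List String) :
    day10_parse data = data.map PySem.Str.split₀ := by
  unfold day10_parse
  simpa using day10_parse_eq_aux data []

lemma ins_fold_eq (data : List String) (acc : List Int) :
    data.foldl day10_ins_step acc = acc ++ eflat (data.map PySem.Str.split₀) := by
  induction data generalizing acc with
  | nil => simp [eflat]
  | cons line rest ih =>
    rw [List.foldl_cons, ih, List.map_cons]
    have hstep : day10_ins_step acc line = acc ++ eop (PySem.Str.split₀ line) := by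
      simp only [day10_ins_step, eop]
      by_cases h : (PySem.Str.split₀ line).length > 1
      · simp only [if_pos h]
        match PySem.Str.split₀ line, h with
        | [_, v], _ => simp
        | _ :: _ :: _ :: _, _ => simp
      · simp [if_neg h]
    rw [hstep]
    simp [eflat]

-- step lemma for x after one day10_cycle pop: from cycle n the pipeline pops L[n-2]
lemma x_after_pop (L : List Int) (n : Nat) (hn : n ≤ L.length) :
    (if (p1f L n).length > 0 then
      match PySem.List.pop? (p1f L n) (-1) with
      | some (v, _) => xa L n + v
      | none => xa L n
     else xa L n) = 1 + (L.take (n - 1)).sum := by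
  unfold p1f xa
  by_cases h2 : 2 ≤ n
  · have hlt : n - 2 < L.length := by omega
    simp only [if_pos h2, List.length_cons, List.length_nil]
    have hpop : PySem.List.pop? [L.getD (n - 2) 0] (-1) = some (L.getD (n - 2) 0, []) := by
      simp [PySem.List.pop?, PySem.List.pyIdx?]
    rw [hpop]
    have : n - 1 = (n - 2) + 1 := by omega
    rw [this, sum_take_succ L (n - 2) hlt]
    simp; ring
  · simp only [if_neg h2]
    have : n - 2 = 0 ∧ n - 1 = 0 := by omega
    simp [this.1, this.2]

lemma p2f_eq (L : List Int) (n : Nat) : p2f L n = p1f L (n + 1) := by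
  unfold p1f p2f
  by_cases h : 1 ≤ n
  · rw [if_pos h, if_pos (by omega : 2 ≤ n + 1), show n + 1 - 2 = n - 1 from by omega]
  · rw [if_neg h, if_neg (by omega : ¬ 2 ≤ n + 1)]

lemma day10_cycle_eq (L : List Int) (n : Nat) (hn : n ≤ L.length) (val : Int) (p2 : List Int) :
    day10_cycle (xa L n) val (p1f L n) p2 = (xa L (n + 1), p2, [val]) := by
  unfold day10_cycle
  have hx := x_after_pop L n hn
  simp only []
  rw [hx]
  rfl

-- one-step peel of the checked-cycles sum
lemma S_cons (L : List Int) (n : Nat) (h : n < L.length) :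
    S L n = (if PySem.Int.mod ((n : Int) - 20) 40 == 0 then (n : Int) * xa L n else 0)
      + S L (n + 1) := by
  unfold S
  rw [show L.length - n = (L.length - (n + 1)) + 1 by omega, List.range'_succ,
    List.map_cons, List.sum_cons]

-- facts read off from Full.drop n = v :: tail
lemma drop_cons_facts (L tail : List Int) (v : Int) (n : Nat) (h : L.drop n = v :: tail) :
    n < L.length ∧ L.getD n 0 = v ∧ L.drop (n + 1) = tail := by
  have hlen : n < L.length := by
    by_contra hc
    rw [List.drop_eq_nil_of_le (by omega)] at h
    exact (List.cons_ne_nil v tail) h.symm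
  have hget : L[n]? = some v := by
    rw [← List.head?_drop, h]; rfl
  refine ⟨hlen, by simp [List.getD_eq_getElem?_getD, hget], ?_⟩
  rw [← List.tail_drop, h]; rfl

-- the main invariant of A's fold
lemma aloop_inv (Full : List Int) (ops : List (List String))
    (hg : ∀ op ∈ ops, GoodOp op) (n : Nat) (h : Full.drop n = eflat ops)
    (hn : n ≤ Full.length) (t : Int) :
    ops.foldl day10_step (xa Full n, (n : Int), p1f Full n, p2f Full n, t)
      = (xa Full Full.length, (Full.length : Int), p1f Full Full.length,
         p2f Full Full.length, t + S Full n) := by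
  induction ops generalizing n t with
  | nil =>
    have hfl : Full.length ≤ n := by
      by_contra hc
      have : Full.drop n ≠ [] := by
        intro he
        have := List.drop_eq_nil_iff.mp he
        omega
      exact this (by simpa [eflat] using h)
    have hEq : n = Full.length := by omega
    subst hEq
    simp [S]
  | cons op rest ih =>
    have hop := hg op (List.mem_cons_self)
    have hrest : ∀ o ∈ rest, GoodOp o := fun o ho => hg o (List.mem_cons_of_mem op ho)
    rw [List.foldl_cons]
    rcases hop with hle | ⟨h2, _⟩
    · -- 1-cycle op: eop op = [0]
      have heop : eop op = [0] := by unfold eop; rw [if_neg (by omega)]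
      unfold eflat at h
      rw [List.flatMap_cons, heop] at h
      simp only [List.cons_append, List.nil_append] at h
      obtain ⟨hlt, hget, hdrop⟩ := drop_cons_facts _ _ _ _ h
      have hstep : day10_step (xa Full n, (n : Int), p1f Full n, p2f Full n, t) op
          = (xa Full (n + 1), ((n + 1 : Nat) : Int), p1f Full (n + 1), p2f Full (n + 1),
             if PySem.Int.mod ((n : Int) - 20) 40 == 0 then t + (n : Int) * xa Full n else t) := by
        have hp2 : [(0 : Int)] = p2f Full (n + 1) := by
          unfold p2f
          rw [if_pos (by omega : 1 ≤ n + 1), show n + 1 - 1 = n from rfl, hget]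
        simp only [day10_step, if_neg (by omega : ¬ op.length > 1),
          day10_cycle_eq Full n hn, p2f_eq]
        rw [hp2, p2f_eq]
        push_cast
        rfl
      rw [hstep, ih hrest (n + 1) hdrop (by omega)]
      rw [S_cons Full n hlt]
      split_ifs <;> ring_nf
    · -- 2-cycle op: op = [a, v]
      obtain ⟨a, v, rfl⟩ : ∃ a v, op = [a, v] := by
        match op, h2 with
        | [a, v], _ => exact ⟨a, v, rfl⟩
      set val := (PySem.Int.ofStr? v).getD 0 with hval
      have heop : eop [a, v] = [val, 0] := by unfold eop; rw [if_pos (by simp)]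
      unfold eflat at h
      rw [List.flatMap_cons, heop] at h
      simp only [List.cons_append, List.nil_append] at h
      obtain ⟨hlt, hget, hdrop1⟩ := drop_cons_facts _ _ _ _ h
      obtain ⟨hlt1, hget1, hdrop⟩ := drop_cons_facts _ _ _ _ hdrop1
      have hstep : day10_step (xa Full n, (n : Int), p1f Full n, p2f Full n, t) [a, v]
          = (xa Full (n + 2), ((n + 2 : Nat) : Int), p1f Full (n + 2), p2f Full (n + 2),
             (if PySem.Int.mod (((n + 1 : Nat) : Int) - 20) 40 == 0 then
                (if PySem.Int.mod ((n : Int) - 20) 40 == 0 then t + (n : Int) * xa Full n else t)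
                  + ((n + 1 : Nat) : Int) * xa Full (n + 1)
              else
                (if PySem.Int.mod ((n : Int) - 20) 40 == 0 then t + (n : Int) * xa Full n else t))) := by
        have hp1 : [val] = p1f Full (n + 2) := by
          unfold p1f
          rw [if_pos (by omega : 2 ≤ n + 2), show n + 2 - 2 = n from rfl, hget]
        have hp2 : [(0 : Int)] = p2f Full (n + 2) := by
          unfold p2f
          rw [if_pos (by omega : 1 ≤ n + 2), show n + 2 - 1 = n + 1 from rfl, hget1]
        simp only [day10_step, if_pos (by simp : ([a, v] : List String).length > 1),
          day10_cycle_eq Full n hn, p2f_eq, day10_cycle_eq Full (n + 1) (by omega : n + 1 ≤ Full.length)]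
        rw [hp1, hp2, p2f_eq]
        push_cast
        rfl
      rw [hstep, ih hrest (n + 2) hdrop (by omega)]
      rw [S_cons Full n hlt, S_cons Full (n + 1) hlt1]
      push_cast
      split_ifs <;> ring_nf

lemma cond_imp_ge2 (k : Nat) (hc : (PySem.Int.mod ((k : Int) - 20) 40 == 0) = true) : 20 ≤ k := by
  have hdvd : (40 : Int) ∣ ((k : Int) - 20) := by
    rw [← PySem.Int.mod_eq_zero_iff_dvd]
    simpa using hc
  by_contra hlt
  have := Int.le_of_dvd (show (0 : Int) < 20 - (k : Int) by omega) (by simpa using hdvd.neg_right)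
  omega

lemma sum_filter_map_ite {α : Type} (l : List α) (p : α → Bool) (f : α → Int) :
    ((l.filter p).map f).sum = (l.map (fun x => if p x then f x else 0)).sum := by
  induction l with
  | nil => rfl
  | cons a l ih =>
    by_cases h : p a
    · simp [h, ih]
    · simp [h, ih]

lemma pre_fold_spec (ins : List Int) (P : List Int) (s : Int)
    (h : (PySem.List.pyGet? P (-1)).getD 0 = s) :
    ins.foldl day10_pre_step P
      = P ++ (List.range ins.length).map (fun k => s + (ins.take (k + 1)).sum) := by
  induction ins generalizing P s with
  | nil => simp
  | cons v rest ih =>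
    rw [List.foldl_cons, show day10_pre_step P v = P ++ [s + v] by
      unfold day10_pre_step; rw [h]]
    rw [ih (P ++ [s + v]) (s + v) (by simp [PySem.List.pyGet?, PySem.List.pyIdx?])]
    rw [List.append_assoc]
    congr 1
    rw [List.length_cons, List.range_succ_eq_map, List.map_cons, List.map_map]
    simp only [List.take_succ_cons, List.singleton_append, List.cons.injEq]
    refine ⟨by simp, List.map_congr_left fun k _ => ?_⟩
    simp [List.sum_cons, add_assoc]

lemma pre_getD (ins : List Int) (j : Nat) (hj : j ≤ ins.length) :
    (PySem.List.pyGet? (ins.foldl day10_pre_step [0]) ((j : Nat) : Int)).getD 0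
      = (ins.take j).sum := by
  rw [pre_fold_spec ins [0] 0 (by simp [PySem.List.pyGet?, PySem.List.pyIdx?])]
  rw [show PySem.List.pyGet? ([(0 : Int)] ++ (List.range ins.length).map
        (fun k => 0 + (ins.take (k + 1)).sum)) ((j : Nat) : Int)
      = ([(0 : Int)] ++ (List.range ins.length).map
        (fun k => 0 + (ins.take (k + 1)).sum))[j]? by simp [pysem]]
  match j with
  | 0 => simp
  | m + 1 =>
    rw [List.singleton_append, List.getElem?_cons_succ, List.getElem?_map,
      List.getElem?_range (by omega : m < ins.length)]
    simp

lemma b_sum_eq_S (L : List Int) :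
    (((PySem.List.pyRange 0 (L.length : Int) 1).filter
        (fun c => PySem.Int.mod (c - 20) 40 == 0)).map
      (fun c => c * (1 + (PySem.List.pyGet? (L.foldl day10_pre_step [0]) (c - 2)).getD 0))).sum
      = S L 0 := by
  rw [sum_filter_map_ite, PySem.List.pyRange_zero_natCast, List.map_map]
  unfold S
  rw [Nat.sub_zero, ← List.range_eq_range']
  refine congrArg List.sum (List.map_congr_left ?_)
  intro k hk
  simp only [Function.comp_apply]
  by_cases hc : (PySem.Int.mod ((k : Int) - 20) 40 == 0) = true
  · rw [if_pos hc, if_pos hc]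
    have h20 : 20 ≤ k := cond_imp_ge2 k hc
    have hk' : k < L.length := List.mem_range.mp hk
    have hcast : (k : Int) - 2 = ((k - 2 : Nat) : Int) := by omega
    rw [hcast, pre_getD L (k - 2) (by omega)]
    rfl
  · rw [if_neg hc, if_neg hc]

-- ===== VERDICT (by name: the statement is the Claim_ definition above) =====
theorem day10_1_spec : Claim_equal_day10_1 := by
  intro data _ hpre
  unfold Spec_day10_1 day10_1 day10_1_alt
  rw [day10_parse_eq, ins_fold_eq]
  simp only [List.nil_append]
  set ops := data.map PySem.Str.split₀ with hops
  have hg : ∀ op ∈ ops, GoodOp op := by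
    intro op hop
    rw [hops] at hop
    obtain ⟨line, hline, rfl⟩ := List.mem_map.mp hop
    exact hpre line hline
  have h0 : (eflat ops).drop 0 = eflat ops := rfl
  have := aloop_inv (eflat ops) ops hg 0 h0 (by omega) 0
  have hinit : xa (eflat ops) 0 = 1 ∧ p1f (eflat ops) 0 = [] ∧ p2f (eflat ops) 0 = [] := by
    refine ⟨?_, ?_, ?_⟩ <;> simp [xa, p1f, p2f]
  rw [hinit.1, hinit.2.1, hinit.2.2] at this
  rw [show ((0:Nat):Int) = 0 from rfl] at this
  rw [this]
  simp only [zero_add]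
  exact (b_sum_eq_S (eflat ops)).symm
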